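-- pv_equiv track=rewrite | github.com/asmaBelkerrouche/phishing-detector | features.py | has_generic_greeting
-- ===== SOURCE A (Python) =====
-- def has_generic_greeting(text):
--     generic_greetings = [
--         'dear customer', 'dear user', 'dear member', 'dear client',
--         'valued customer', 'valued member', 'hello customer',
--         'hello user', 'greetings', 'to whom it may concern'
--     ]
--     text_lower = str(text).lower()
--     for greeting in generic_greetings:
--         if greeting in text_lower:
--             return 1
--     return 0
-- ===== SOURCE B (Python) =====
-- GENERIC_GREETING_PHRASES = (
--     'dear customer',
--     'dear user',
--     'dear member',
--     'dear client',
--     'valued customer',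
--     'valued member',
--     'hello customer',
--     'hello user',
--     'greetings',
--     'to whom it may concern',
-- )
--
-- def has_generic_greeting(text):
--     lowered = str(text).lower()
--     for pos in range(len(lowered) + 1):
--         if any(lowered.startswith(phrase, pos) for phrase in GENERIC_GREETING_PHRASES):
--             return 1
--     return 0
-- ===== Notes on version B (the rewrite author's own statement) =====
-- stated objective: alternative
-- what changed: B makes a single left-to-right scan over the lowered text, at each position testing whether any greeting phrase starts there, instead of A running one full substring search over the text per phrase.
import Mathlib
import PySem

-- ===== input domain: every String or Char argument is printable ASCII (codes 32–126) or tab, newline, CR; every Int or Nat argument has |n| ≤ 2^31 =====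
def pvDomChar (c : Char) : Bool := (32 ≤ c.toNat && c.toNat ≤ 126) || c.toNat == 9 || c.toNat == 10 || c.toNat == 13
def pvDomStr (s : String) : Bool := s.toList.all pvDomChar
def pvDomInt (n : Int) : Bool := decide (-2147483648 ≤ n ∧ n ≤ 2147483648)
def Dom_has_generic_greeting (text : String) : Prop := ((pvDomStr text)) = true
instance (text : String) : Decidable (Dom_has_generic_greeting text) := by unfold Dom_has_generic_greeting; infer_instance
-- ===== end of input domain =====

-- B scans the lowered text once, testing at each position whether any greeting starts there,
-- instead of A's one full substring search per greeting phrase (objective: alternative).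

-- ===== PORT A =====
def genericGreetings : List String :=
  ["dear customer", "dear user", "dear member", "dear client",
   "valued customer", "valued member", "hello customer",
   "hello user", "greetings", "to whom it may concern"]

-- A: 'for greeting in …: if greeting in text_lower: return 1' / 'return 0'
def has_generic_greeting (text : String) : Int :=
  let text_lower := PySem.Str.lower text
  if genericGreetings.any (fun greeting => PySem.Str.isIn greeting text_lower) then 1 else 0

-- ===== PORT B =====
-- B's inner loop at position i: 'text_lower.startswith(greeting, i)'; the outer loop over
-- i in range(len+1) is this structural recursion on the remaining suffix.
def scanGreetB (gs : List (List Char)) : List Char → Int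
  | [] => if gs.any (fun g => g.isPrefixOf []) then 1 else 0
  | c :: rest =>
      if gs.any (fun g => g.isPrefixOf (c :: rest)) then 1 else scanGreetB gs rest

def has_generic_greeting_alt (text : String) : Int :=
  let text_lower := PySem.Str.lower text
  scanGreetB (genericGreetings.map String.toList) text_lower.toList

-- ===== PRECONDITION & SPEC =====
def Spec_has_generic_greeting (text : String) (out : Int) : Prop := out = has_generic_greeting_alt text
instance (text : String) (out : Int) : Decidable (Spec_has_generic_greeting text out) := by unfold Spec_has_generic_greeting; infer_instance

-- ===== CLAIM (what is proved, stated in full; the proofs are below) =====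
def Claim_equal_has_generic_greeting : Prop := ∀ (text : String), Dom_has_generic_greeting text → Spec_has_generic_greeting text (has_generic_greeting text)

-- ===== LEMMAS AND PROOFS =====

theorem scanGreetB_eq (gs : List (List Char)) (s : List Char) :
    scanGreetB gs s = if gs.any (fun g => PySem.Chars.isIn g s) then 1 else 0 := by
  induction s with
  | nil =>
      simp only [scanGreetB]
      have : gs.any (fun g => g.isPrefixOf []) = gs.any (fun g => PySem.Chars.isIn g []) := by
        apply Bool.eq_iff_iff.mpr
        simp only [List.any_eq_true]
        constructor
        · rintro ⟨g, hg, hp⟩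
          exact ⟨g, hg, by simpa [PySem.Chars.isIn_iff_infix] using
            (List.IsPrefix.isInfix (List.isPrefixOf_iff_prefix.mp hp))⟩
        · rintro ⟨g, hg, hin⟩
          rw [PySem.Chars.isIn_iff_infix] at hin
          have hinf := hin
          have hnil : g = [] := List.eq_nil_of_infix_nil hinf
          exact ⟨g, hg, by simp [hnil]⟩
      rw [this]
  | cons c rest ih =>
      simp only [scanGreetB, ih]
      by_cases h : gs.any (fun g => g.isPrefixOf (c :: rest)) = true
      · obtain ⟨g, hg, hp⟩ := List.any_eq_true.mp h
        have hin : gs.any (fun g => PySem.Chars.isIn g (c :: rest)) = true :=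
          List.any_eq_true.mpr ⟨g, hg, by
            simpa [PySem.Chars.isIn_iff_infix] using
              (List.IsPrefix.isInfix (List.isPrefixOf_iff_prefix.mp hp))⟩
        rw [if_pos h, if_pos hin]
      · rw [if_neg h]
        have : gs.any (fun g => PySem.Chars.isIn g rest)
             = gs.any (fun g => PySem.Chars.isIn g (c :: rest)) := by
          apply Bool.eq_iff_iff.mpr
          simp only [List.any_eq_true]
          constructor
          · rintro ⟨g, hg, hin⟩
            refine ⟨g, hg, ?_⟩
            rw [PySem.Chars.isIn_iff_infix] at hin ⊢
            rw [List.infix_cons_iff]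
            exact Or.inr hin
          · rintro ⟨g, hg, hin⟩
            rw [PySem.Chars.isIn_iff_infix, List.infix_cons_iff] at hin
            rcases hin with hpre | hinf
            · have hpref : gs.any (fun g => g.isPrefixOf (c :: rest)) = true :=
                List.any_eq_true.mpr ⟨g, hg, List.isPrefixOf_iff_prefix.mpr hpre⟩
              exact absurd hpref h
            · refine ⟨g, hg, ?_⟩
              rw [PySem.Chars.isIn_iff_infix]
              exact hinf
        rw [this]

-- ===== VERDICT (by name: the statement is the Claim_ definition above) =====
theorem has_generic_greeting_spec : Claim_equal_has_generic_greeting := by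
  intro text _
  unfold Spec_has_generic_greeting has_generic_greeting has_generic_greeting_alt
  rw [scanGreetB_eq]
  simp [List.any_map, Function.comp, PySem.Str.isIn]
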